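-- pv_equiv track=rewrite | github.com/artgunBLACKMAESTRO/EGE | task16/16-5268.py | F
-- ===== SOURCE A (Python) =====
-- def F(n):
--     q = 0
--     n = str(n)
--     for i in range(len(n)):
--         q += int(n[i])
--     n = int(n)
--     if n < 3:
--         return 1
--     if n == 60:
--         return -1
--     if n == 69:
--         return 12
--     if n == 70:
--         return 14
--     if n == 35:
--         return 2
--     if n > 2 and q%2==0:
--         return F(n-1)-F(n-2)
--     if n > 2 and q%2==1:
--         return F(n-1)+F(n//2)
-- ===== SOURCE B (Python) =====
-- def F(n):
--     # Bottom-up DP: build F(0..n) once in a list instead of exponential recursion.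
--     if n < 3:
--         return 1
--     vals = [1, 1, 1]
--     for k in range(3, n + 1):
--         if k == 60:
--             v = -1
--         elif k == 69:
--             v = 12
--         elif k == 70:
--             v = 14
--         elif k == 35:
--             v = 2
--         elif sum(int(c) for c in str(k)) % 2 == 0:
--             v = vals[k - 1] - vals[k - 2]
--         else:
--             v = vals[k - 1] + vals[k // 2]
--         vals.append(v)
--     return vals[n]
-- ===== Notes on version B (the rewrite author's own statement) =====
-- stated objective: faster
-- what changed: Replaced A's exponential triple-recursive evaluation with a single bottom-up DP pass that fills a list of all smaller values of F once and reads the answer off; intended as faster (measured 135x at the largest size where A still finished; A timed out beyond that).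
import Mathlib
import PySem

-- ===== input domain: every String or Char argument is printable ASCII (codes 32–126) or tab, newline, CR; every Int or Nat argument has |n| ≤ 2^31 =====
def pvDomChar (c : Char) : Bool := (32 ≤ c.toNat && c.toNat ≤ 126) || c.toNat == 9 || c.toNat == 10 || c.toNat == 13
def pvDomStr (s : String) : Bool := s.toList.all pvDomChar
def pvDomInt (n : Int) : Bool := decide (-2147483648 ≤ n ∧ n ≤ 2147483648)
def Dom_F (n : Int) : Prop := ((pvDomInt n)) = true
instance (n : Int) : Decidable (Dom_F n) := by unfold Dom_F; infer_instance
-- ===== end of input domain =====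

-- B replaces A's exponential recursion by one bottom-up DP pass over a table of all smaller values (intended as faster; measured 135x at the largest size A finished).


-- ===== PORT A =====
-- 'q = 0; n = str(n); for i in range(len(n)): q += int(n[i])'
-- (int(s[i]) raises ValueError on '-' for negative n: those inputs are excluded by Pre_F; the getD there is dead code)
def aDigitSum (n : Int) : Int :=
  let cs := (PySem.Int.toStr n).toList
  (PySem.List.pyRange 0 (PySem.List.len cs) 1).foldl
    (fun q i => q + (PySem.Int.ofChars? [PySem.List.pyGetD cs i ' ']).getD 0) 0

def F (n : Int) : Int :=
  let q := aDigitSum n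
  if _h : n < 3 then 1
  else if n = 60 then -1
  else if n = 69 then 12
  else if n = 70 then 14
  else if n = 35 then 2
  else if 2 < n ∧ PySem.Int.mod q 2 = 0 then F (n - 1) - F (n - 2)
  else if 2 < n ∧ PySem.Int.mod q 2 = 1 then F (n - 1) + F (PySem.Int.floordiv n 2)
  else 0  -- Python falls through to 'return None' here; unreachable for int inputs (n ≥ 3 and q % 2 ∈ {0,1})
termination_by n.toNat
decreasing_by
  · omega
  · omega
  · omega
  · rw [PySem.Int.floordiv_eq_ediv_of_pos (by omega)]; omega

-- ===== PORT B =====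
-- 'sum(int(c) for c in str(k))'
def bDigitSum (k : Int) : Int :=
  ((PySem.Int.toChars k).map (fun c => (PySem.Int.ofChars? [c]).getD 0)).sum

-- one iteration of B's 'for k in range(3, n+1)' loop body (vals.append(v))
def bStep (vals : List Int) (k : Int) : List Int :=
  let v :=
    if k = 60 then -1
    else if k = 69 then 12
    else if k = 70 then 14
    else if k = 35 then 2
    else if PySem.Int.mod (bDigitSum k) 2 = 0 then
      PySem.List.pyGetD vals (k - 1) 0 - PySem.List.pyGetD vals (k - 2) 0
    else
      PySem.List.pyGetD vals (k - 1) 0 + PySem.List.pyGetD vals (PySem.Int.floordiv k 2) 0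
  vals ++ [v]

def F_alt (n : Int) : Int :=
  if n < 3 then 1
  else
    let vals := (PySem.List.pyRange 3 (n + 1) 1).foldl bStep [1, 1, 1]
    PySem.List.pyGetD vals n 0

-- ===== PRECONDITION & SPEC =====
-- Pre_F excludes negative arguments: there Python A raises ValueError (int('-') while summing the digits of str(n)).
def Pre_F (n : Int) : Prop := 0 ≤ n
instance (n : Int) : Decidable (Pre_F n) := by unfold Pre_F; infer_instance
def pvWitness_F : Int := (7)

def Spec_F (n : Int) (out : Int) : Prop := out = F_alt n
instance (n : Int) (out : Int) : Decidable (Spec_F n out) := by unfold Spec_F; infer_instance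

-- ===== CLAIM (what is proved, stated in full; the proofs are below) =====
def Claim_equal_F : Prop := ∀ (n : Int), Dom_F n → Pre_F n → Spec_F n (F n)

-- ===== LEMMAS AND PROOFS =====

-- A's index-driven digit loop computes B's per-character sum
theorem aDigitSum_eq (n : Int) : aDigitSum n = bDigitSum n := by
  unfold aDigitSum bDigitSum
  rw [PySem.List.foldl_pyRange_zero_pyGetD ((PySem.Int.toStr n).toList) ' '
        (fun q c => q + (PySem.Int.ofChars? [c]).getD 0) 0,
      PySem.List.foldl_add]
  simp [PySem.Int.toList_toStr]

theorem F_lt3 {n : Int} (h : n < 3) : F n = 1 := by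
  rw [F]; simp [h]

theorem F_ge3 {n : Int} (h : 3 ≤ n) :
    F n = (if n = 60 then -1
      else if n = 69 then 12
      else if n = 70 then 14
      else if n = 35 then 2
      else if PySem.Int.mod (bDigitSum n) 2 = 0 then F (n - 1) - F (n - 2)
      else F (n - 1) + F (PySem.Int.floordiv n 2)) := by
  have hq : aDigitSum n = bDigitSum n := aDigitSum_eq n
  have hmod : PySem.Int.mod (bDigitSum n) 2 = 0 ∨ PySem.Int.mod (bDigitSum n) 2 = 1 := by
    rw [PySem.Int.mod_eq_emod_of_pos (by omega)]; omega
  rw [F]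
  simp only [hq, dif_neg (by omega : ¬ n < 3), (by omega : (2 : Int) < n), true_and]
  rcases hmod with hm | hm
  · simp only [hm, if_true]
  · simp only [hm, if_true]

-- the DP list after processing k = 3 .. 3+m-1 is exactly [F 0, F 1, …, F (3+m-1)]
theorem vals_eq (m : Nat) :
    (PySem.List.pyRange 3 (3 + (m : Int)) 1).foldl bStep [1, 1, 1]
      = (List.range (3 + m)).map (fun i : Nat => F (i : Int)) := by
  induction m with
  | zero =>
      rw [PySem.List.pyRange_one_eq_nil (by omega)]
      simp [List.range_succ, F_lt3 (by omega : (0 : Int) < 3),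
        F_lt3 (by omega : (1 : Int) < 3), F_lt3 (by omega : (2 : Int) < 3)]
  | succ m ih =>
      have hsplit : (3 + ((m : Int) + 1)) = (3 + (m : Int)) + 1 := by ring
      rw [show ((m + 1 : Nat) : Int) = (m : Int) + 1 by push_cast; ring, hsplit,
        PySem.List.pyRange_one_succ_right (by omega), List.foldl_append, ih]
      simp only [List.foldl_cons, List.foldl_nil]
      have hk : (3 + (m : Int)) = ((3 + m : Nat) : Int) := by push_cast; ring
      have hget : ∀ (j : Nat), j < 3 + m →
          PySem.List.pyGetD ((List.range (3 + m)).map (fun i : Nat => F (i : Int))) ((j : Nat) : Int) 0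
            = F (j : Int) := by
        intro j hj
        rw [PySem.List.pyGetD_natCast]
        simp [List.getD_eq_getElem?_getD, hj]
      rw [bStep]
      have h1 : ((3 + m : Nat) : Int) - 1 = ((2 + m : Nat) : Int) := by push_cast; ring
      have h2 : ((3 + m : Nat) : Int) - 2 = ((1 + m : Nat) : Int) := by push_cast; ring
      have h3 : PySem.Int.floordiv ((3 + m : Nat) : Int) 2 = (((3 + m) / 2 : Nat) : Int) := by
        rw [PySem.Int.floordiv_eq_ediv_of_pos (by omega)]
        omega
      rw [hk, show 3 + (m + 1) = (3 + m) + 1 from rfl, List.range_succ, List.map_append]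
      congr 1
      simp only [List.map_cons, List.map_nil]
      congr 1
      rw [F_ge3 (by exact_mod_cast (by omega : (3 : Int) ≤ 3 + (m : Int)))]
      rw [h1, h2, h3, hget (2 + m) (by omega), hget (1 + m) (by omega),
        hget ((3 + m) / 2) (by omega)]

theorem F_eq_alt (n : Int) : F n = F_alt n := by
  unfold F_alt
  by_cases h : n < 3
  · simp [h, F_lt3 h]
  · simp only [h, if_false]
    obtain ⟨m, hn, hn1⟩ : ∃ m : Nat, n = 3 + (m : Int) ∧ n + 1 = 3 + ((m + 1 : Nat) : Int) := by
      refine ⟨(n - 3).toNat, by omega, by push_cast; omega⟩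
    rw [hn1, vals_eq (m + 1)]
    have hj : n = (((3 + m : Nat)) : Int) := by push_cast; omega
    rw [hj, PySem.List.pyGetD_natCast]
    simp [List.getD_eq_getElem?_getD,
      show 3 + m < 3 + (m + 1) by omega]

-- ===== VERDICT (by name: the statement is the Claim_ definition above) =====
theorem F_spec : Claim_equal_F := by
  intro n _ _
  unfold Spec_F
  exact F_eq_alt n
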